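-- pv_equiv track=rewrite | github.com/COG-UK/UK-recombination-analysis | geography/lineage_freq_plots.py | get_toplin_counts
-- ===== SOURCE A (Python) =====
-- def get_toplin_counts(linvec, toplins):
--     d = {x: 0 for x in toplins}
--     for v in linvec:
--         if v in d:
--             d[v] += 1
--         else:
--             d["other"] += 1
--
--     return(d)
-- ===== SOURCE B (Python) =====
-- def get_toplin_counts(linvec, toplins):
--     counts = {}
--     for v in linvec:
--         counts[v] = counts.get(v, 0) + 1
--     d = {x: counts.get(x, 0) for x in toplins}
--     other = sum(c for k, c in counts.items() if k not in d)
--     if other: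
--         d["other"] += other
--     return d
-- ===== Notes on version B (the rewrite author's own statement) =====
-- stated objective: alternative
-- what changed: Replaces A's per-element if/else scan over a pre-seeded dict by a frequency table built first (counts), then a comprehension over toplins reading counts, then one aggregate 'other' total folded in at the end.
import Mathlib
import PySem

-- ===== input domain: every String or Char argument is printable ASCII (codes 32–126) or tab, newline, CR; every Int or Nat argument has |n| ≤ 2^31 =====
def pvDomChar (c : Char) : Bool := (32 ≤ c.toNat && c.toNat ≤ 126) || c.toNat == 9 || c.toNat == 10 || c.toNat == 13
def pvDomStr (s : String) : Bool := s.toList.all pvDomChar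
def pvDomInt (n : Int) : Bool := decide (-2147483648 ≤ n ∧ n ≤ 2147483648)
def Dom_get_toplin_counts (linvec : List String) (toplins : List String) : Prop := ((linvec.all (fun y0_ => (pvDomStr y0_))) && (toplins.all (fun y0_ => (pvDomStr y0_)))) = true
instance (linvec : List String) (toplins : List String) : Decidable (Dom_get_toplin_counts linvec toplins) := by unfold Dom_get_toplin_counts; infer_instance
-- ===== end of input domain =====

-- B tabulates frequencies first and folds the non-top total in at the end, instead of A's per-element if/else scan (alternative decomposition, same cost).

-- ===== PORT A =====
def get_toplin_counts (linvec : List String) (toplins : List String) : List (String × Int) :=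
  let d0 : PySem.Dict String Int := toplins.foldl (fun d x => d.insert x 0) PySem.Dict.empty
  let d := linvec.foldl (fun d v =>
      if d.contains v then d.modify v 0 (· + 1) else d.modify "other" 0 (· + 1)) d0
  d.items

-- ===== PORT B =====
def get_toplin_counts_alt (linvec : List String) (toplins : List String) : List (String × Int) :=
  let counts : PySem.Dict String Int := linvec.foldl (fun c v => c.insert v (c.getD v 0 + 1)) PySem.Dict.empty
  let d := toplins.foldl (fun d x => d.insert x (counts.getD x 0)) PySem.Dict.empty
  let other := ((counts.items.filter (fun p => !(d.contains p.1))).map (·.2)).sum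
  if other ≠ 0 then (d.modify "other" 0 (· + other)).items else d.items

-- ===== PRECONDITION & SPEC =====
-- Pre_ excludes exactly the inputs where A raises KeyError: some linvec element outside toplins while "other" is not a top lineage (B raises there too).
def Pre_get_toplin_counts (linvec : List String) (toplins : List String) : Prop :=
  "other" ∈ toplins ∨ ∀ v ∈ linvec, v ∈ toplins
instance (linvec : List String) (toplins : List String) : Decidable (Pre_get_toplin_counts linvec toplins) := by
  unfold Pre_get_toplin_counts; infer_instance
def pvWitness_get_toplin_counts : List String × List String := (["A", "B", "A", "X"], ["A", "other"])

def Spec_get_toplin_counts (linvec : List String) (toplins : List String) (out : List (String × Int)) : Prop := out = get_toplin_counts_alt linvec toplins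
instance (linvec : List String) (toplins : List String) (out : List (String × Int)) : Decidable (Spec_get_toplin_counts linvec toplins out) := by unfold Spec_get_toplin_counts; infer_instance

-- ===== CLAIM (what is proved, stated in full; the proofs are below) =====
def Claim_equal_get_toplin_counts : Prop := ∀ (linvec : List String) (toplins : List String), Dom_get_toplin_counts linvec toplins → Pre_get_toplin_counts linvec toplins → Spec_get_toplin_counts linvec toplins (get_toplin_counts linvec toplins)


-- ===== LEMMAS AND PROOFS =====

-- getD through a fold of inserts whose values depend only on the inserted key
theorem pv_foldl_insert_fun_getD (l : List String) (f : String → Int)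
    (d : PySem.Dict String Int) (k : String) (c : Int) :
    (l.foldl (fun d x => d.insert x (f x)) d).getD k c
      = if k ∈ l then f k else d.getD k c := by
  induction l generalizing d with
  | nil => simp
  | cons x l ih =>
    simp only [List.foldl_cons, ih, PySem.Dict.getD_insert, List.mem_cons]
    by_cases hkl : k ∈ l <;> by_cases hkx : k = x <;> simp [hkl, hkx]

-- A's loop step
def pv_stepA (d : PySem.Dict String Int) (v : String) : PySem.Dict String Int :=
  if d.contains v then d.modify v 0 (· + 1) else d.modify "other" 0 (· + 1)

-- one step of A's loop on a reachable dict keeps the key list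
theorem pv_stepA_keys (d : PySem.Dict String Int) (v : String)
    (hv : d.contains v = true ∨ d.contains "other" = true) :
    (pv_stepA d v).keys = d.keys := by
  unfold pv_stepA
  by_cases hc : d.contains v = true
  · rw [if_pos hc, PySem.Dict.keys_modify, PySem.Dict.keys_insert_of_contains _ _ hc]
  · have ho : d.contains "other" = true := hv.resolve_left hc
    rw [if_neg hc, PySem.Dict.keys_modify, PySem.Dict.keys_insert_of_contains _ _ ho]

theorem pv_stepA_contains (d : PySem.Dict String Int) (v : String)
    (hv : d.contains v = true ∨ d.contains "other" = true) (x : String) :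
    (pv_stepA d v).contains x = d.contains x := by
  rw [PySem.Dict.contains_eq_decide_mem_keys, PySem.Dict.contains_eq_decide_mem_keys,
    pv_stepA_keys d v hv]

-- invariant of A's loop: keys unchanged, and each key's count is the number of
-- occurrences of that key among the top elements, plus (for "other") the number
-- of non-top elements
theorem pv_loopA (l : List String) (d : PySem.Dict String Int)
    (h : ∀ v ∈ l, d.contains v = true ∨ d.contains "other" = true) :
    (l.foldl pv_stepA d).keys = d.keys ∧
      ∀ k, (l.foldl pv_stepA d).getD k 0
        = d.getD k 0 + ((l.filter (fun v => d.contains v)).count k : Int)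
          + (if k = "other" then (((l.filter (fun v => !d.contains v)).length : Nat) : Int) else 0) := by
  induction l generalizing d with
  | nil => simp
  | cons v l ih =>
    have hv : d.contains v = true ∨ d.contains "other" = true := h v (by simp)
    have hkeys : (pv_stepA d v).keys = d.keys := pv_stepA_keys d v hv
    have hcont : ∀ x, (pv_stepA d v).contains x = d.contains x := pv_stepA_contains d v hv
    have h' : ∀ w ∈ l, (pv_stepA d v).contains w = true ∨ (pv_stepA d v).contains "other" = true := by
      intro w hw; rw [hcont, hcont]; exact h w (by simp [hw])
    obtain ⟨ihk, ihv⟩ := ih (pv_stepA d v) h'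
    constructor
    · rw [List.foldl_cons, ihk, hkeys]
    · intro k
      rw [List.foldl_cons, ihv k]
      simp only [hcont]
      have hstep : (pv_stepA d v).getD k 0
          = d.getD k 0 + (if d.contains v = true then (if k = v then 1 else 0)
              else (if k = "other" then 1 else 0)) := by
        unfold pv_stepA
        by_cases hc : d.contains v = true
        · rw [if_pos hc, if_pos hc, PySem.Dict.getD_modify]
          by_cases hkv : k = v <;> simp [hkv]
        · rw [if_neg hc, if_neg hc, PySem.Dict.getD_modify]
          by_cases hko : k = "other" <;> simp [hko]
      rw [hstep]
      by_cases hc : d.contains v = true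
      · simp only [List.filter_cons, hc, Bool.not_true, if_pos, Bool.false_eq_true,
          List.count_cons]
        by_cases hkv : k = v
        · subst hkv; simp; omega
        · have : (v == k) = false := by simp [Ne.symm hkv]
          simp [hkv, this]
      · have hcb : d.contains v = false := by simpa using hc
        simp only [List.filter_cons, hcb, Bool.not_false, Bool.false_eq_true,
          if_pos, List.length_cons]
        by_cases hko : k = "other"
        · subst hko; simp; omega
        · simp [hko]

-- sum of multiplicities over the distinct elements satisfying p = length of the filter
theorem pv_sum_count_filter (l u : List String) (p : String → Bool) (hu : u.Nodup)
    (hl : ∀ v ∈ l, p v = true → v ∈ u) :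
    ((u.filter p).map (fun k => (l.count k : Int))).sum = ((l.filter p).length : Int) := by
  induction l with
  | nil =>
    rw [List.sum_eq_zero] <;> simp
  | cons a l ih =>
    have hl' : ∀ v ∈ l, p v = true → v ∈ u := fun v hv => hl v (by simp [hv])
    have hmap : ∀ k ∈ u.filter p, ((a :: l).count k : Int)
        = (l.count k : Int) + (if a == k then (1:Int) else 0) := by
      intro k _
      rw [List.count_cons]
      push_cast
      split <;> simp_all
    rw [List.map_congr_left hmap, PySem.List.sum_map_add_int, ih hl']
    have hite : ((u.filter p).map (fun k => if a == k then (1:Int) else 0)).sum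
        = (((u.filter p).countP (fun k => a == k) : Nat) : Int) :=
      PySem.List.sum_map_ite_one_zero (fun k => a == k) (u.filter p)
    have hcnt : (u.filter p).countP (fun k => a == k) = (u.filter p).count a := by
      unfold List.count
      exact List.countP_congr (by intro x _; simp [BEq.comm])
    rw [hite, hcnt]
    by_cases hpa : p a = true
    · have hau : a ∈ u.filter p := List.mem_filter.mpr ⟨hl a (by simp) hpa, hpa⟩
      rw [List.count_eq_one_of_mem (hu.filter p) hau]
      simp [hpa]
    · have hau : a ∉ u.filter p := fun hmem => hpa (List.mem_filter.mp hmem).2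
      rw [List.count_eq_zero_of_not_mem hau]
      have hpa' : p a = false := by simpa using hpa
      simp [hpa']

-- ===== VERDICT (by name: the statement is the Claim_ definition above) =====
theorem get_toplin_counts_spec : Claim_equal_get_toplin_counts := by
  intro linvec toplins _ hpre
  unfold Spec_get_toplin_counts
  simp only [get_toplin_counts, get_toplin_counts_alt]
  have hstep : (fun (d : PySem.Dict String Int) v =>
      if d.contains v then d.modify v 0 (· + 1) else d.modify "other" 0 (· + 1)) = pv_stepA := rfl
  rw [hstep]
  set d0 : PySem.Dict String Int :=
    toplins.foldl (fun d x => d.insert x (0:Int)) PySem.Dict.empty with hd0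
  set counts : PySem.Dict String Int :=
    linvec.foldl (fun c v => c.insert v (c.getD v 0 + 1)) PySem.Dict.empty with hcounts
  set dB : PySem.Dict String Int :=
    toplins.foldl (fun d x => d.insert x (counts.getD x 0)) PySem.Dict.empty with hdB
  have hcounter : counts = PySem.Dict.counter linvec :=
    PySem.Dict.foldl_insert_getD_add_one_eq_counter linvec
  -- keys of d0 and dB
  have hd0keys : d0.keys = PySem.Set.ofList toplins := by
    have h := PySem.Dict.keys_foldl_insert toplins (fun _ _ => (0:Int)) PySem.Dict.empty
    rw [hd0, h, PySem.Dict.keys_empty, PySem.Set.update_nil_left]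
  have hdBkeys : dB.keys = PySem.Set.ofList toplins := by
    have h := PySem.Dict.keys_foldl_insert toplins (fun _ x => counts.getD x 0) PySem.Dict.empty
    rw [hdB, h, PySem.Dict.keys_empty, PySem.Set.update_nil_left]
  have hd0cont : ∀ v, d0.contains v = decide (v ∈ toplins) := by
    intro v
    rw [PySem.Dict.contains_eq_decide_mem_keys, hd0keys]
    simp [PySem.Set.mem_ofList]
  have hdBcont : ∀ v, dB.contains v = decide (v ∈ toplins) := by
    intro v
    rw [PySem.Dict.contains_eq_decide_mem_keys, hdBkeys]
    simp [PySem.Set.mem_ofList]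
  have hd0getD : ∀ k, d0.getD k 0 = 0 := by
    intro k
    have h := pv_foldl_insert_fun_getD toplins (fun _ => (0:Int)) PySem.Dict.empty k 0
    rw [hd0, h]
    split <;> simp
  have hdBgetD : ∀ k, k ∈ toplins → dB.getD k 0 = (linvec.count k : Int) := by
    intro k hk
    have h := pv_foldl_insert_fun_getD toplins (fun x => counts.getD x 0) PySem.Dict.empty k 0
    rw [hdB, h, if_pos hk, hcounter, PySem.Dict.getD_counter]
  -- A's loop characterisation
  have hA : ∀ v ∈ linvec, d0.contains v = true ∨ d0.contains "other" = true := by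
    intro v hv
    rcases hpre with ho | hall
    · right; simp [hd0cont, ho]
    · left; simp [hd0cont, hall v hv]
  obtain ⟨hAkeys, hAval⟩ := pv_loopA linvec d0 hA
  -- the "other" total of B
  have hoth : ((counts.items.filter (fun p => !(dB.contains p.1))).map (·.2)).sum
      = (((linvec.filter (fun v => !(decide (v ∈ toplins)))).length : Nat) : Int) := by
    rw [hcounter, PySem.Dict.items_counter, List.filter_map, List.map_map]
    have hpred : ((fun p : String × Int => !(dB.contains p.1)) ∘
        (fun k => (k, (linvec.count k : Int)))) = fun k => !(decide (k ∈ toplins)) := by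
      funext k; simp [Function.comp, hdBcont]
    rw [hpred]
    have hmap : ((fun p : String × Int => p.2) ∘ (fun k => (k, (linvec.count k : Int))))
        = fun k => (linvec.count k : Int) := by funext k; rfl
    rw [hmap]
    exact pv_sum_count_filter linvec (PySem.Set.ofList linvec) _
      (PySem.Set.nodup_ofList linvec)
      (fun v hv _ => (PySem.Set.mem_ofList linvec v).mpr hv)
  -- pointwise value of A's result at a top key
  have hAat : ∀ k, k ∈ toplins → (linvec.foldl pv_stepA d0).getD k 0
      = (linvec.count k : Int) + (if k = "other"
          then (((linvec.filter (fun v => !(decide (v ∈ toplins)))).length : Nat) : Int) else 0) := by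
    intro k hk
    rw [hAval k, hd0getD k]
    have hf1 : linvec.filter (fun v => d0.contains v) = linvec.filter (fun v => decide (v ∈ toplins)) :=
      List.filter_congr (fun x _ => hd0cont x)
    have hf2 : linvec.filter (fun v => !(d0.contains v))
        = linvec.filter (fun v => !(decide (v ∈ toplins))) :=
      List.filter_congr (fun x _ => by rw [hd0cont x])
    rw [hf1, hf2, List.count_filter (by simp [hk])]
    omega
  set oth : Int := ((counts.items.filter (fun p => !(dB.contains p.1))).map (·.2)).sum with hothdef
  have hAnodup : (linvec.foldl pv_stepA d0).keys.Nodup := by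
    rw [hAkeys, hd0keys]; exact PySem.Set.nodup_ofList toplins
  have hBnodup : dB.keys.Nodup := by rw [hdBkeys]; exact PySem.Set.nodup_ofList toplins
  by_cases hz : oth ≠ 0
  · -- some non-top element exists, so "other" ∈ toplins
    rw [if_pos hz]
    have hne : ∃ v ∈ linvec, v ∉ toplins := by
      by_contra hcon
      push Not at hcon
      have : linvec.filter (fun v => !(decide (v ∈ toplins))) = [] := by
        apply List.filter_eq_nil_iff.mpr
        intro v hv; simp [hcon v hv]
      have hz2 : oth ≠ 0 := hz
      rw [hoth, this] at hz2
      simp at hz2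
    have hoin : "other" ∈ toplins := by
      rcases hpre with ho | hall
      · exact ho
      · obtain ⟨v, hv, hnv⟩ := hne; exact absurd (hall v hv) hnv
    have hcontother : dB.contains "other" = true := by simp [hdBcont, hoin]
    have hMkeys : (dB.modify "other" 0 (· + oth)).keys = dB.keys := by
      rw [PySem.Dict.keys_modify, PySem.Dict.keys_insert_of_contains _ _ hcontother]
    rw [PySem.Dict.items_eq_map_keys _ hAnodup 0,
        PySem.Dict.items_eq_map_keys _ (by rw [hMkeys]; exact hBnodup) 0,
        hAkeys, hd0keys, hMkeys, hdBkeys]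
    apply List.map_congr_left
    intro k hk
    have hkt : k ∈ toplins := (PySem.Set.mem_ofList toplins k).mp hk
    rw [hAat k hkt, PySem.Dict.getD_modify]
    by_cases hko : k = "other"
    · subst hko
      rw [if_pos rfl, if_pos rfl, hdBgetD _ hoin, hoth]
    · rw [if_neg hko, if_neg hko, hdBgetD k hkt]
      simp
  · rw [if_neg hz]
    have hz2 : oth = 0 := by simpa using hz
    rw [hoth] at hz2
    have hall : ∀ v ∈ linvec, decide (v ∈ toplins) = true := by
      intro v hv
      by_contra hcon
      have hmem : v ∈ linvec.filter (fun w => !(decide (w ∈ toplins))) := by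
        apply List.mem_filter.mpr
        exact ⟨hv, by simp_all⟩
      have hnil : linvec.filter (fun w => !(decide (w ∈ toplins))) ≠ [] := by
        intro h0; rw [h0] at hmem; simp at hmem
      have := List.length_pos_of_ne_nil hnil
      omega
    have hflen : linvec.filter (fun v => !(decide (v ∈ toplins))) = [] := by
      apply List.filter_eq_nil_iff.mpr
      intro v hv; simp [hall v hv]
    rw [PySem.Dict.items_eq_map_keys _ hAnodup 0,
        PySem.Dict.items_eq_map_keys _ hBnodup 0, hAkeys, hd0keys, hdBkeys]
    apply List.map_congr_left
    intro k hk
    have hkt : k ∈ toplins := (PySem.Set.mem_ofList toplins k).mp hk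
    rw [hAat k hkt, hdBgetD k hkt, hflen]
    simp
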